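-- pv_equiv track=rewrite | github.com/docxology/MetaInformAnt | src/metainformant/metagenomics/amplicon/taxonomy.py | _build_kmer_profiles
-- ===== SOURCE A (Python) =====
-- def _build_kmer_profiles(
--     reference_db: dict[str, str],
--     k: int = 8,
-- ) -> dict[str, set[str]]:
--     """Build k-mer profiles for reference sequences.
--
--     Args:
--         reference_db: Mapping of reference IDs to sequences.
--         k: K-mer size.
--
--     Returns:
--         Mapping of reference IDs to sets of k-mers.
--     """
--     profiles: dict[str, set[str]] = {}
--     for ref_id, seq in reference_db.items():
--         seq_upper = seq.upper()
--         kmers = set()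
--         for i in range(len(seq_upper) - k + 1):
--             kmer = seq_upper[i : i + k]
--             if all(c in "ACGT" for c in kmer):
--                 kmers.add(kmer)
--         profiles[ref_id] = kmers
--     return profiles
-- ===== SOURCE B (Python) =====
-- def _build_kmer_profiles(
--     reference_db: dict[str, str],
--     k: int = 8,
-- ) -> dict[str, set[str]]:
--     """Build k-mer profiles by splitting each sequence into maximal runs of
--     valid bases, then taking every k-window inside each run."""
--     profiles: dict[str, set[str]] = {}
--     for ref_id, seq in reference_db.items():
--         s = seq.upper()
--         segs = []
--         cur = []
--         for c in s:
--             if c in "ACGT":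
--                 cur.append(c)
--             else:
--                 segs.append("".join(cur))
--                 cur = []
--         segs.append("".join(cur))
--         kmers = set()
--         for seg in segs:
--             for j in range(len(seg) - k + 1):
--                 kmers.add(seg[j:j + k])
--         profiles[ref_id] = kmers
--     return profiles
-- ===== Notes on version B (the rewrite author's own statement) =====
-- stated objective: alternative
-- what changed: Instead of testing every k-window for being all-ACGT, B splits each uppercased sequence into maximal runs of valid bases in one pass and then enumerates every k-window inside each run unconditionally; Pre_ restricts k to the natural domain k >= 0, since for negative k A's windows s[i:i+k] wrap to negative-stop slices that are not k-mers.
-- outside the precondition, e.g. on _build_kmer_profiles({'r0': 'AC GT'}, -1): A returns {'r0': {''}}, B returns {'r0': {'', 'A', 'G'}}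
import Mathlib
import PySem

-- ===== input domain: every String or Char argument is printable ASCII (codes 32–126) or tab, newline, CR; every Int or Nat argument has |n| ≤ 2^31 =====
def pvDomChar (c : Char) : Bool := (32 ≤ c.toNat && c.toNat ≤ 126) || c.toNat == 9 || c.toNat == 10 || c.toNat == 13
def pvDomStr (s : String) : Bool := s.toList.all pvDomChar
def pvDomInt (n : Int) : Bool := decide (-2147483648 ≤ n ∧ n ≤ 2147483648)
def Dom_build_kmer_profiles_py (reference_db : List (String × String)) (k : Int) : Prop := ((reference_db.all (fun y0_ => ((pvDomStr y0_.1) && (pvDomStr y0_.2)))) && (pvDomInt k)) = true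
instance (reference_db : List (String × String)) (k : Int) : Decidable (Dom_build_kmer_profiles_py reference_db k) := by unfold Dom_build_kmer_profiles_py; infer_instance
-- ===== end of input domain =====

-- B splits each uppercased sequence into maximal runs of valid bases in one pass and
-- enumerates every k-window inside each run, instead of testing each window for being all-ACGT.

-- ===== PORT A =====
-- 'c in "ACGT"' for a single character c is character membership (exact).
def build_kmer_profiles_py (reference_db : List (String × String)) (k : Int) : List (String × List String) :=
  (reference_db.foldl
    (fun (profiles : PySem.Dict String (List String)) p =>
      let seq_upper := PySem.Str.upper p.2
      let kmers := (PySem.List.pyRange 0 (PySem.Str.len seq_upper - k + 1) 1).foldl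
        (fun (s : PySem.Set String) i =>
          let kmer := PySem.Str.slice seq_upper (some i) (some (i + k))
          if kmer.toList.all (fun c => "ACGT".toList.contains c) then PySem.Set.add s kmer else s)
        PySem.Set.empty
      profiles.insert p.1 kmers)
    PySem.Dict.empty).items

-- ===== PORT B =====
-- 'for c in s' yields characters; '"".join(cur)' over the run's characters is String.ofList (exact).
def build_kmer_profiles_py_alt (reference_db : List (String × String)) (k : Int) : List (String × List String) :=
  (reference_db.foldl
    (fun (profiles : PySem.Dict String (List String)) p =>
      let s := PySem.Str.upper p.2
      let st := s.toList.foldl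
        (fun (acc : List String × List Char) c =>
          if "ACGT".toList.contains c then (acc.1, acc.2 ++ [c])
          else (acc.1 ++ [String.ofList acc.2], []))
        ([], [])
      let segs := st.1 ++ [String.ofList st.2]
      let kmers := segs.foldl
        (fun (km : PySem.Set String) seg =>
          (PySem.List.pyRange 0 (PySem.Str.len seg - k + 1) 1).foldl
            (fun km2 j => PySem.Set.add km2 (PySem.Str.slice seg (some j) (some (j + k)))) km)
        PySem.Set.empty
      profiles.insert p.1 kmers)
    PySem.Dict.empty).items

-- ===== PRECONDITION & SPEC =====
-- Pre_ restricts k to the natural domain of a k-mer size (k ≥ 0): for negative k, on which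
-- A still returns, A's windows s[i:i+k] wrap to negative-stop slices that are not k-mers.
def Pre_build_kmer_profiles_py (reference_db : List (String × String)) (k : Int) : Prop := 0 ≤ k
instance (reference_db : List (String × String)) (k : Int) : Decidable (Pre_build_kmer_profiles_py reference_db k) := by unfold Pre_build_kmer_profiles_py; infer_instance
def pvWitness_build_kmer_profiles_py : (List (String × String)) × Int := ([("r1", "ACxGTa")], 2)

def Spec_build_kmer_profiles_py (reference_db : List (String × String)) (k : Int) (out : List (String × List String)) : Prop := out = build_kmer_profiles_py_alt reference_db k
instance (reference_db : List (String × String)) (k : Int) (out : List (String × List String)) : Decidable (Spec_build_kmer_profiles_py reference_db k out) := by unfold Spec_build_kmer_profiles_py; infer_instance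

-- ===== CLAIM (what is proved, stated in full; the proofs are below) =====
def Claim_equal_build_kmer_profiles_py : Prop := ∀ (reference_db : List (String × String)) (k : Int), Dom_build_kmer_profiles_py reference_db k → Pre_build_kmer_profiles_py reference_db k → Spec_build_kmer_profiles_py reference_db k (build_kmer_profiles_py reference_db k)

-- ===== LEMMAS AND PROOFS =====

-- a valid base
def pvOK (c : Char) : Bool := "ACGT".toList.contains c

-- the valid k-windows of cs, in order of start index (what A collects)
def pvVwin (cs : List Char) (kn : Nat) : List (List Char) :=
  ((List.range (cs.length + 1 - kn)).filter (fun i => ((cs.drop i).take kn).all pvOK)).map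
    (fun i => (cs.drop i).take kn)

-- all k-windows of a run (what B collects per segment)
def pvAwin (l : List Char) (kn : Nat) : List (List Char) :=
  (List.range (l.length + 1 - kn)).map (fun i => (l.drop i).take kn)

-- the maximal-run segmentation: first run, remaining segments
def pvSegs : List Char → List Char × List (List Char)
  | [] => ([], [])
  | c :: r => if pvOK c then ((c :: (pvSegs r).1), (pvSegs r).2) else ([], (pvSegs r).1 :: (pvSegs r).2)

theorem pvSegs_fst_valid (cs : List Char) : (pvSegs cs).1.all pvOK = true := by
  induction cs with
  | nil => rfl
  | cons c r ih => by_cases h : pvOK c <;> simp [pvSegs, h, ih]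

theorem pvSegs_fst_prefix (cs : List Char) :
    ∃ r, cs = (pvSegs cs).1 ++ r ∧ (r = [] ∨ ∃ d r', r = d :: r' ∧ pvOK d = false) := by
  induction cs with
  | nil => exact ⟨[], rfl, Or.inl rfl⟩
  | cons c cs ih =>
      by_cases h : pvOK c
      · obtain ⟨r, hr, hh⟩ := ih
        exact ⟨r, by simp [pvSegs, h]; exact hr, hh⟩
      · exact ⟨c :: cs, by simp [pvSegs, h], Or.inr ⟨c, cs, rfl, by simpa using h⟩⟩

theorem pvVwin_nil (kn : Nat) : pvVwin [] kn = pvAwin [] kn := by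
  cases kn <;> simp [pvVwin, pvAwin]

theorem pvVwin_cons (c : Char) (cs : List Char) (kn : Nat) :
    pvVwin (c :: cs) kn =
      (if kn ≤ cs.length + 1 then
        (if ((c :: cs).take kn).all pvOK then [(c :: cs).take kn] else []) else [])
      ++ pvVwin cs kn := by
  by_cases h : kn ≤ cs.length + 1
  · have hlen : (c :: cs).length + 1 - kn = (cs.length + 1 - kn) + 1 := by
      simp only [List.length_cons]; omega
    simp only [pvVwin, hlen, List.range_succ_eq_map, List.filter_cons, List.filter_map,
      List.map_cons, List.map_map, h, if_true]
    by_cases hv : ((c :: cs).take kn).all pvOK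
    · simp [hv, Function.comp_def]
    · simp [hv, Function.comp_def]
  · have h1 : cs.length + 1 + 1 - kn = 0 := by omega
    have h2 : cs.length + 1 - kn = 0 := by omega
    simp [pvVwin, h1, h2, h]

theorem pvAwin_cons (c : Char) (l : List Char) (kn : Nat) :
    pvAwin (c :: l) kn =
      (if kn ≤ l.length + 1 then [(c :: l).take kn] else []) ++ pvAwin l kn := by
  by_cases h : kn ≤ l.length + 1
  · have hlen : l.length + 1 + 1 - kn = (l.length + 1 - kn) + 1 := by omega
    simp [pvAwin, hlen, List.range_succ_eq_map, List.map_map, h, Function.comp_def,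
      List.drop_succ_cons]
  · have h1 : l.length + 1 + 1 - kn = 0 := by omega
    have h2 : l.length + 1 - kn = 0 := by omega
    simp [pvAwin, h1, h2, h]

-- MAIN: valid windows of cs are exactly the windows of its maximal valid runs, in order
theorem pvMain (cs : List Char) (kn : Nat) :
    pvVwin cs kn = ((pvSegs cs).1 :: (pvSegs cs).2).flatMap (fun seg => pvAwin seg kn) := by
  induction cs with
  | nil => simp [pvSegs, pvVwin_nil]
  | cons c cs ih =>
      by_cases hv : pvOK c
      · simp only [pvSegs, hv, if_true]
        obtain ⟨r, hr, hstop⟩ := pvSegs_fst_prefix cs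
        set h := (pvSegs cs).1 with hh
        rw [List.flatMap_cons, pvAwin_cons, pvVwin_cons, ih, List.flatMap_cons]
        rw [List.append_assoc]
        congr 1
        -- heads equal
        by_cases hk : kn ≤ h.length + 1
        · have hk2 : kn ≤ cs.length + 1 := by
            have : h.length ≤ cs.length := by
              rw [hr]; simp
            omega
          have htake : (c :: cs).take kn = (c :: h).take kn := by
            cases kn with
            | zero => simp
            | succ m =>
                simp only [List.take_succ_cons]
                congr 1
                rw [hr, List.take_append_of_le_length (by omega)]
          have hall : ((c :: cs).take kn).all pvOK = true := by
            rw [htake, List.all_eq_true]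
            intro x hx
            have hx' := List.mem_of_mem_take hx
            simp only [List.mem_cons] at hx'
            rcases hx' with rfl | hx'
            · exact hv
            · have hvalid := pvSegs_fst_valid cs
              rw [← hh, List.all_eq_true] at hvalid
              exact hvalid x hx'
          have hall' : ((c :: h).take kn).all pvOK = true := by rw [← htake]; exact hall
          simp only [hk, hk2, if_true, htake, hall']
        · -- kn > |h|+1 : run too short; A's window (if any) crosses the first invalid char
          simp only [hk, if_false]
          by_cases hk2 : kn ≤ cs.length + 1
          · -- r is nonempty with invalid head d at position h.length of cs
            have hrne : r ≠ [] := by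
              intro h0
              rw [h0, List.append_nil] at hr
              rw [← hr] at hk
              omega
            have hex : ∃ d r', r = d :: r' ∧ pvOK d = false := by
              rcases hstop with h0 | hex
              · exact absurd h0 hrne
              · exact hex
            obtain ⟨d, r', hdr, hd⟩ := hex
            have hall : ((c :: cs).take kn).all pvOK = false := by
              rw [List.all_eq_false]
              refine ⟨d, ?_, by simp [hd]⟩
              have hmem : d ∈ (c :: cs).take kn := by
                have hidx : (c :: cs)[h.length + 1]? = some d := by
                  rw [List.getElem?_cons_succ, hr, hdr]
                  rw [List.getElem?_append_right (by omega)]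
                  simp
                have : (h.length + 1) < kn := by omega
                have hlt : h.length + 1 < (c :: cs).length := by
                  simp only [List.length_cons]
                  have : cs.length = h.length + r.length := by rw [hr]; simp
                  rw [hdr] at this
                  simp at this
                  omega
                rw [← List.take_append_drop kn (c :: cs)] at hidx
                rw [List.getElem?_append_left (by
                  simp only [List.length_take, List.length_cons]
                  omega)] at hidx
                exact List.mem_of_getElem? hidx
              exact hmem
            simp [hk2, hall]
          · simp [hk2]
      · have hv' : pvOK c = false := by simpa using hv
        simp only [pvSegs, hv', Bool.false_eq_true, if_false]
        rw [List.flatMap_cons, pvVwin_cons, ih]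
        congr 1
        cases kn with
        | zero => simp [pvAwin]
        | succ m =>
            have ha : pvAwin [] (m + 1) = [] := by simp [pvAwin]
            rw [ha]
            by_cases hk : m + 1 ≤ cs.length + 1
            · have hall : ((c :: cs).take (m + 1)).all pvOK = false := by
                rw [List.all_eq_false]
                exact ⟨c, by simp, by simp [hv]⟩
              simp [hk, hall, hv']
            · simp [hk]

-- pointwise-equal folding functions fold equally
theorem pvFoldlCongr {α β : Type} (l : List β) (f g : α → β → α) (init : α)
    (h : ∀ a b, f a b = g a b) : l.foldl f init = l.foldl g init := by
  have : f = g := funext fun a => funext fun b => h a b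
  rw [this]

-- loop shape: fold of conditional Set.add = fold of Set.add over the filtered-mapped list
theorem pvFoldAddIf {ι α : Type} [BEq α] (l : List ι) (c : ι → Bool) (f : ι → α) (st : PySem.Set α) :
    l.foldl (fun st i => if c i then PySem.Set.add st (f i) else st) st
      = (((l.filter c).map f).foldl PySem.Set.add st) := by
  induction l generalizing st with
  | nil => rfl
  | cons x l ih =>
      by_cases h : c x <;> simp [List.filter_cons, h, ih]

-- loop shape: fold of unconditional Set.add over a mapped range
theorem pvFoldAddMap {ι α : Type} [BEq α] (l : List ι) (f : ι → α) (st : PySem.Set α) :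
    l.foldl (fun st i => PySem.Set.add st (f i)) st = ((l.map f).foldl PySem.Set.add st) := by
  rw [List.foldl_map]

-- loop shape: nested fold over segments = fold over the flatMap
theorem pvFoldSegs {σ α : Type} [BEq α] (segs : List σ) (g : σ → List α) (st : PySem.Set α) :
    segs.foldl (fun km seg => (g seg).foldl PySem.Set.add km) st
      = ((segs.flatMap g).foldl PySem.Set.add st) := by
  induction segs generalizing st with
  | nil => rfl
  | cons s segs ih => simp [List.flatMap_cons, List.foldl_append, ih]

-- B's segment-building fold produces exactly the maximal-run segmentation
theorem pvFoldSegsOf (cs : List Char) (segs : List String) (cur : List Char) :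
    (cs.foldl
      (fun (acc : List String × List Char) c =>
        if "ACGT".toList.contains c then (acc.1, acc.2 ++ [c])
        else (acc.1 ++ [String.ofList acc.2], []))
      (segs, cur)).1
    ++ [String.ofList (cs.foldl
      (fun (acc : List String × List Char) c =>
        if "ACGT".toList.contains c then (acc.1, acc.2 ++ [c])
        else (acc.1 ++ [String.ofList acc.2], []))
      (segs, cur)).2]
    = segs ++ String.ofList (cur ++ (pvSegs cs).1) :: ((pvSegs cs).2).map String.ofList := by
  induction cs generalizing segs cur with
  | nil => simp [pvSegs]
  | cons c cs ih =>
      by_cases h : pvOK c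
      · have h' : "ACGT".toList.contains c = true := h
        simp only [List.foldl_cons, h', if_true, pvSegs, h]
        rw [ih]
        simp
      · have h' : "ACGT".toList.contains c = false := by simpa [pvOK] using h
        simp only [List.foldl_cons, h', Bool.false_eq_true, if_false, pvSegs, h]
        rw [ih]
        simp

-- the k-window of a string at a Nat start, for 0 ≤ k, is the char-level window
theorem pvSliceWin (s : String) (i : Nat) (k : Int) (hk : 0 ≤ k) :
    PySem.Str.slice s (some (i : Int)) (some ((i : Int) + k)) = String.ofList ((s.toList.drop i).take k.toNat) := by
  have hks : (i : Int) + k = ((i + k.toNat : Nat) : Int) := by push_cast; omega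
  have h1 : (PySem.Str.slice s (some (i : Int)) (some ((i : Int) + k))).toList
      = (s.toList.drop i).take k.toNat := by
    rw [PySem.Str.toList_slice]
    show PySem.List.slice s.toList (some (i : Int)) (some ((i : Int) + k)) = _
    rw [hks, PySem.List.slice_natCast]
    have : i + k.toNat - i = k.toNat := by omega
    rw [this]
  have := congrArg String.ofList h1
  simpa using this

-- per-sequence equality of the two k-mer sets
theorem pvInner (s : String) (k : Int) (hk : 0 ≤ k) :
    (PySem.List.pyRange 0 (PySem.Str.len s - k + 1) 1).foldl
      (fun (st : PySem.Set String) i =>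
        let kmer := PySem.Str.slice s (some i) (some (i + k))
        if kmer.toList.all (fun c => "ACGT".toList.contains c) then PySem.Set.add st kmer else st)
      PySem.Set.empty
    = ((((pvSegs s.toList).1 :: (pvSegs s.toList).2).flatMap (fun seg => pvAwin seg k.toNat)).map
        String.ofList).foldl PySem.Set.add PySem.Set.empty := by
  rw [← pvMain s.toList k.toNat]
  have hm : (PySem.Str.len s - k + 1 - 0).toNat = s.toList.length + 1 - k.toNat := by
    rw [PySem.Str.len_eq]
    omega
  rw [PySem.List.pyRange_one, hm]
  rw [List.foldl_map]
  have hcongr : ∀ (st : PySem.Set String) (i : Nat),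
      (fun (st : PySem.Set String) i =>
        let kmer := PySem.Str.slice s (some i) (some (i + k))
        if kmer.toList.all (fun c => "ACGT".toList.contains c) then PySem.Set.add st kmer else st)
        st ((0 : Int) + (i : Int))
      = if ((s.toList.drop i).take k.toNat).all pvOK
        then PySem.Set.add st (String.ofList ((s.toList.drop i).take k.toNat)) else st := by
    intro st i
    simp only [Int.zero_add]
    rw [pvSliceWin s i k hk]
    have ht : (String.ofList ((s.toList.drop i).take k.toNat)).toList = (s.toList.drop i).take k.toNat := by
      simp
    rw [ht]
    rfl
  rw [pvFoldlCongr _ _ _ _ hcongr]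
  rw [pvFoldAddIf]
  congr 1
  simp only [pvVwin, List.map_map]
  rfl

-- ===== VERDICT (by name: the statement is the Claim_ definition above) =====
theorem build_kmer_profiles_py_spec : Claim_equal_build_kmer_profiles_py := by
  intro reference_db k _ hkpre
  have hk : 0 ≤ k := hkpre
  unfold Spec_build_kmer_profiles_py build_kmer_profiles_py build_kmer_profiles_py_alt
  congr 1
  apply PySem.List.foldl_congr_mem
  intro profiles p _
  dsimp only
  congr 1
  rw [pvInner (PySem.Str.upper p.2) k hk]
  set s := PySem.Str.upper p.2 with hs
  have hsegs :
      (s.toList.foldl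
        (fun (acc : List String × List Char) c =>
          if "ACGT".toList.contains c then (acc.1, acc.2 ++ [c])
          else (acc.1 ++ [String.ofList acc.2], []))
        ([], [])).1
      ++ [String.ofList (s.toList.foldl
        (fun (acc : List String × List Char) c =>
          if "ACGT".toList.contains c then (acc.1, acc.2 ++ [c])
          else (acc.1 ++ [String.ofList acc.2], []))
        ([], [])).2]
      = ((pvSegs s.toList).1 :: (pvSegs s.toList).2).map String.ofList := by
    rw [pvFoldSegsOf]
    simp
  rw [hsegs]
  -- per segment, the unconditional window fold is fold-add over its windows
  have hseg : ∀ (km : PySem.Set String) (seg : String),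
      (PySem.List.pyRange 0 (PySem.Str.len seg - k + 1) 1).foldl
        (fun km2 j => PySem.Set.add km2 (PySem.Str.slice seg (some j) (some (j + k)))) km
      = ((pvAwin seg.toList k.toNat).map String.ofList).foldl PySem.Set.add km := by
    intro km seg
    have hm : (PySem.Str.len seg - k + 1 - 0).toNat = seg.toList.length + 1 - k.toNat := by
      rw [PySem.Str.len_eq]
      omega
    rw [PySem.List.pyRange_one, hm, List.foldl_map]
    have hcongr : ∀ (st : PySem.Set String) (i : Nat),
        PySem.Set.add st (PySem.Str.slice seg (some ((0:Int) + i)) (some ((0:Int) + i + k)))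
        = PySem.Set.add st (String.ofList ((seg.toList.drop i).take k.toNat)) := by
      intro st i
      rw [Int.zero_add, pvSliceWin seg i k hk]
    rw [pvFoldlCongr _ _ _ _ hcongr]
    rw [pvFoldAddMap]
    rw [pvAwin, List.map_map]
    rfl
  symm
  rw [pvFoldlCongr _ _ _ _ hseg]
  rw [pvFoldSegs]
  rw [List.flatMap_map]
  simp only [String.toList_ofList]
  rw [← List.map_flatMap]
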